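-- pv_equiv track=rewrite | github.com/yubinbai/pcuva-problems | UVa 10137 The Trip/expenses.py | transferAmount
-- ===== SOURCE A (Python) =====
-- def transferAmount(expenses, n):
--     currSum = sum(expenses)
--     average = currSum // n
--     leftoverCents = currSum % n
--     # if a person is paying more than average, let him lose the extra cent
--     # to minimize transfer
--     transfer = 0
--     for i in expenses:
--         if i >= average:
--             if leftoverCents > 0:
--                 transfer += i - average - 1
--                 leftoverCents -= 1
--             else:
--                 transfer += i - average
--     return transfer
-- ===== SOURCE B (Python) =====
-- def transferAmount(expenses, n):
--     average, leftover = divmod(sum(expenses), n)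
--     high = average + 1
--     give_low = 0   # total transferred if every at-or-above-average person pays down to average
--     give_high = 0  # total transferred if every at-or-above-average person pays down to average+1
--     for i in expenses:
--         if i >= average:
--             give_low += i - average
--             give_high += i - high
--     # leftover cents let at most `leftover` people keep one extra cent each,
--     # so the minimal transfer is the larger of the two scenario totals
--     return max(give_low - leftover, give_high)
-- ===== Notes on version B (the rewrite author's own statement) =====
-- stated objective: alternative
-- what changed: Replaces A's loop that threads a decrementing leftover-cents counter (branching per person on whether a cent is still available) with the classic two-target formulation: compute the two scenario totals (everyone above average pays down to average, or to average+1) and return the larger, so no counter or per-person discount decision exists.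
-- outside the precondition, e.g. on transferAmount([1, 2], 0): A raises ZeroDivisionError, B raises ZeroDivisionError; on transferAmount([1, 2], -2): A returns 7, B returns 8
import Mathlib
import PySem

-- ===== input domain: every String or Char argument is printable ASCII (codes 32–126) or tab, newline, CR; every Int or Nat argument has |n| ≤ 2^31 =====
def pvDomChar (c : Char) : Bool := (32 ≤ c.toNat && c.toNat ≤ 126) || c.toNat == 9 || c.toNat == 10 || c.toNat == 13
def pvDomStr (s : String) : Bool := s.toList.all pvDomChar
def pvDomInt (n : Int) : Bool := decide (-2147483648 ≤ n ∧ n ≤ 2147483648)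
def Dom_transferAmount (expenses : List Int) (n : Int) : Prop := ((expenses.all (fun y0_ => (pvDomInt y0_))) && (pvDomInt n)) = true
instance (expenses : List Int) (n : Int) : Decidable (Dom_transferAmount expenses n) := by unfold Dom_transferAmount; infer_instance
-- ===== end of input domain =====

-- B drops A's stateful leftover-cents counter and instead computes the two
-- scenario totals (pay down to average vs to average+1) and returns their max
-- (objective: alternative, classic two-target formulation of the problem).


-- ===== PORT A =====
-- the for-loop of A: state (transfer, leftoverCents), branches in A's order
def transferLoopA (average : Int) : List Int → Int → Int → Int
  | [], transfer, _ => transfer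
  | i :: rest, transfer, leftoverCents =>
    if average ≤ i then
      if 0 < leftoverCents then
        transferLoopA average rest (transfer + (i - average - 1)) (leftoverCents - 1)
      else
        transferLoopA average rest (transfer + (i - average)) leftoverCents
    else
      transferLoopA average rest transfer leftoverCents

def transferAmount (expenses : List Int) (n : Int) : Int :=
  let currSum := expenses.sum
  let average := PySem.Int.floordiv currSum n
  let leftoverCents := PySem.Int.mod currSum n
  transferLoopA average expenses 0 leftoverCents

-- ===== PORT B =====
-- Source B's loop: accumulates the two scenario totals (give_low, give_high)
def scanB (average high : Int) : List Int → Int × Int → Int × Int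
  | [], acc => acc
  | i :: rest, (gl, gh) =>
    if average ≤ i then scanB average high rest (gl + (i - average), gh + (i - high))
    else scanB average high rest (gl, gh)

def transferAmount_alt (expenses : List Int) (n : Int) : Int :=
  let average := PySem.Int.floordiv expenses.sum n
  let leftover := PySem.Int.mod expenses.sum n
  let high := average + 1
  let g := scanB average high expenses (0, 0)
  max (g.1 - leftover) g.2

-- ===== PRECONDITION & SPEC =====
-- Pre_ excludes n ≤ 0: at n = 0 A raises ZeroDivisionError, and a negative n is
-- outside the natural domain (n is the number of people); for n < 0 the value A
-- returns is an artefact of Python's floor division/modulo with a negative divisor.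
def Pre_transferAmount (expenses : List Int) (n : Int) : Prop := 0 < n
instance (expenses : List Int) (n : Int) : Decidable (Pre_transferAmount expenses n) := by unfold Pre_transferAmount; infer_instance
def pvWitness_transferAmount : List Int × Int := ([10, 20, 30], 3)
def Spec_transferAmount (expenses : List Int) (n : Int) (out : Int) : Prop := out = transferAmount_alt expenses n
instance (expenses : List Int) (n : Int) (out : Int) : Decidable (Spec_transferAmount expenses n out) := by unfold Spec_transferAmount; infer_instance

-- ===== CLAIM (what is proved, stated in full; the proofs are below) =====
def Claim_equal_transferAmount : Prop := ∀ (expenses : List Int) (n : Int), Dom_transferAmount expenses n → Pre_transferAmount expenses n → Spec_transferAmount expenses n (transferAmount expenses n)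

-- ===== LEMMAS AND PROOFS =====

-- loop invariant for A: with a nonnegative counter, A's loop computes the surplus
-- sum minus min(counter, number of qualifying elements)
theorem transferLoopA_eq (average : Int) (xs : List Int) :
    ∀ (t l : Int), 0 ≤ l →
      transferLoopA average xs t l =
        t + ((xs.filter (fun i => average ≤ i)).map (fun i => i - average)).sum -
          min l (((xs.filter (fun i => average ≤ i)).length : Int)) := by
  induction xs with
  | nil => intro t l hl; simp [transferLoopA]; omega
  | cons i rest ih =>
    intro t l hl
    by_cases hi : average ≤ i
    · by_cases hpos : 0 < l
      · rw [show transferLoopA average (i :: rest) t l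
            = transferLoopA average rest (t + (i - average - 1)) (l - 1) by
            simp [transferLoopA, hi, hpos]]
        rw [ih _ _ (by omega)]
        simp only [List.filter_cons, hi, decide_true, if_true, List.map_cons,
          List.sum_cons, List.length_cons]
        push_cast
        omega
      · rw [show transferLoopA average (i :: rest) t l
            = transferLoopA average rest (t + (i - average)) l by
            simp [transferLoopA, hi, hpos]]
        rw [ih _ _ hl]
        simp only [List.filter_cons, hi, decide_true, if_true, List.map_cons,
          List.sum_cons, List.length_cons]
        have : l = 0 := by omega
        subst this
        have h0 : (0:Int) ≤ ((rest.filter (fun i => average ≤ i)).length : Int) := by positivity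
        push_cast
        omega
    · rw [show transferLoopA average (i :: rest) t l
          = transferLoopA average rest t l by simp [transferLoopA, hi]]
      rw [ih _ _ hl]
      simp [hi]

-- loop invariant for B: the two accumulators collect the two scenario sums
theorem scanB_eq (average high : Int) (xs : List Int) :
    ∀ (gl gh : Int),
      scanB average high xs (gl, gh) =
        (gl + ((xs.filter (fun i => average ≤ i)).map (fun i => i - average)).sum,
         gh + ((xs.filter (fun i => average ≤ i)).map (fun i => i - high)).sum) := by
  induction xs with
  | nil => intro gl gh; simp [scanB]
  | cons i rest ih =>
    intro gl gh
    by_cases hi : average ≤ i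
    · rw [show scanB average high (i :: rest) (gl, gh)
          = scanB average high rest (gl + (i - average), gh + (i - high)) by
          simp [scanB, hi]]
      rw [ih]
      simp only [List.filter_cons, hi, decide_true, if_true, List.map_cons, List.sum_cons]
      rw [Prod.mk.injEq]; constructor <;> ring
    · rw [show scanB average high (i :: rest) (gl, gh)
          = scanB average high rest (gl, gh) by simp [scanB, hi]]
      rw [ih]
      simp [hi]

-- the high-scenario sum is the low-scenario sum minus the count
theorem sum_shift (average : Int) (ys : List Int) :
    ((ys.filter (fun i => average ≤ i)).map (fun i => i - (average + 1))).sum =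
      ((ys.filter (fun i => average ≤ i)).map (fun i => i - average)).sum -
        ((ys.filter (fun i => average ≤ i)).length : Int) := by
  induction ys with
  | nil => simp
  | cons i rest ih =>
    by_cases hi : average ≤ i
    · simp only [List.filter_cons, hi, decide_true, if_true, List.map_cons,
        List.sum_cons, List.length_cons, ih]
      push_cast; ring
    · simp [hi, ih]

-- ===== VERDICT (by name: the statement is the Claim_ definition above) =====
theorem transferAmount_spec : Claim_equal_transferAmount := by
  intro expenses n _ hn
  unfold Spec_transferAmount
  simp only [transferAmount, transferAmount_alt]
  have hmod : 0 ≤ PySem.Int.mod expenses.sum n := by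
    rw [PySem.Int.mod_eq_emod_of_pos (a := expenses.sum) (show 0 < n from hn)]
    exact Int.emod_nonneg _ (by have h : 0 < n := hn; omega)
  rw [transferLoopA_eq _ _ _ _ hmod]
  rw [scanB_eq, sum_shift]
  have h0 : (0:Int) ≤
      ((expenses.filter (fun i => PySem.Int.floordiv expenses.sum n ≤ i)).length : Int) := by
    positivity
  simp only [zero_add]
  omega
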